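-- pv_equiv track=rewrite | github.com/Prajan2716/Email-ticket-bookingsystem | gmail_handler.py | is_noreply_email
-- ===== SOURCE A (Python) =====
-- def is_noreply_email(email):
--     """
--     Check if email is a no-reply address
--     Returns: True if it's a no-reply email
--     """
--     email_lower = email.lower()
--
--     # Common no-reply patterns
--     noreply_patterns = [
--         "noreply@",
--         "no-reply@",
--         "no_reply@",
--         "donotreply@",
--         "do-not-reply@",
--         "do_not_reply@",
--         "notifications@",
--         "notification@",
--         "automated@",
--         "automation@",
--         "mailer@",
--         "daemon@",
--         "bounce@",
--         "bounces@"
--     ]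
--
--     # Check if email starts with any no-reply pattern
--     for pattern in noreply_patterns:
--         if email_lower.startswith(pattern):
--             return True
--
--     return False
-- ===== SOURCE B (Python) =====
-- _NOREPLY_LOCALS = frozenset({
--     "noreply", "no-reply", "no_reply",
--     "donotreply", "do-not-reply", "do_not_reply",
--     "notifications", "notification",
--     "automated", "automation",
--     "mailer", "daemon", "bounce", "bounces",
-- })
--
--
-- def is_noreply_email(email):
--     """
--     Check if email is a no-reply address
--     Returns: True if it's a no-reply email
--     """
--     local, sep, _ = email.lower().partition("@")
--     return sep == "@" and local in _NOREPLY_LOCALS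
-- ===== Notes on version B (the rewrite author's own statement) =====
-- stated objective: simpler
-- what changed: Replaces the per-pattern startswith loop by extracting the local part (everything before the first '@') once and doing a single set-membership test against the bare names.
import Mathlib
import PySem

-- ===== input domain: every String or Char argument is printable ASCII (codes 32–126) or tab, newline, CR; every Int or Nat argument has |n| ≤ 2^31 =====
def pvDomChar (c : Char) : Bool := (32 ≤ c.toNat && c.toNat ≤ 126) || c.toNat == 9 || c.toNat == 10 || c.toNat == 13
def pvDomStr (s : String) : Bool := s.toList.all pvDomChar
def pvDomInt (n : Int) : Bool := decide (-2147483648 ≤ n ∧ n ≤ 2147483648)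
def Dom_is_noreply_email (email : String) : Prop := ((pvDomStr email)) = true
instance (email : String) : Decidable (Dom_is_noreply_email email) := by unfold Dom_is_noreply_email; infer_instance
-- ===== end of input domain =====

-- B replaces A's per-pattern startswith loop by one extraction of the local part
-- (everything before the first '@') and a single membership test in the bare-name set.
-- ===== PORT A =====
def noreplyPatterns : List String :=
  ["noreply@", "no-reply@", "no_reply@", "donotreply@", "do-not-reply@",
   "do_not_reply@", "notifications@", "notification@", "automated@",
   "automation@", "mailer@", "daemon@", "bounce@", "bounces@"]

-- the for-loop returning True on the first matching pattern, else False
def is_noreply_email (email : String) : Bool :=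
  let email_lower := PySem.Str.lower email
  noreplyPatterns.any (fun pattern => PySem.Str.startswith email_lower pattern)

-- ===== PORT B =====
def noreplyLocals : List (List Char) :=
  ["noreply".toList, "no-reply".toList, "no_reply".toList, "donotreply".toList,
   "do-not-reply".toList, "do_not_reply".toList, "notifications".toList,
   "notification".toList, "automated".toList, "automation".toList,
   "mailer".toList, "daemon".toList, "bounce".toList, "bounces".toList]

-- str.partition('@') ported by hand (exact): the piece before the first '@' is
-- takeWhile (· ≠ '@'), and the separator was found iff '@' occurs in the string.
def is_noreply_email_alt (email : String) : Bool :=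
  let l := PySem.Chars.lower email.toList
  let localPart := l.takeWhile (· ≠ '@')
  ('@' ∈ l) && (localPart ∈ noreplyLocals)

-- ===== PRECONDITION & SPEC =====
def Spec_is_noreply_email (email : String) (out : Bool) : Prop := out = is_noreply_email_alt email
instance (email : String) (out : Bool) : Decidable (Spec_is_noreply_email email out) := by unfold Spec_is_noreply_email; infer_instance

-- ===== CLAIM (what is proved, stated in full; the proofs are below) =====
def Claim_equal_is_noreply_email : Prop := ∀ (email : String), Dom_is_noreply_email email → Spec_is_noreply_email email (is_noreply_email email)

-- ===== LEMMAS AND PROOFS =====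

-- ===== VERDICT (by name: the statement is the Claim_ definition above) =====
-- a pattern "n@" (with '@' not occurring in n) is a prefix of l iff l contains
-- an '@' and the part of l before the first '@' is exactly n
lemma prefix_at_iff (p l : List Char) (hp : '@' ∉ p) :
    ((p ++ ['@']) <+: l) ↔ ('@' ∈ l ∧ l.takeWhile (· ≠ '@') = p) := by
  constructor
  · rintro ⟨rest, hrest⟩
    subst hrest
    refine ⟨by simp, ?_⟩
    rw [List.append_assoc]
    rw [List.takeWhile_append]
    rw [if_pos]
    · simp
    · have ht : p.takeWhile (fun x => decide (x ≠ '@')) = p := by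
        rw [List.takeWhile_eq_self_iff]
        intro c hc
        simp only [decide_eq_true_eq]
        rintro rfl
        exact hp hc
      rw [ht]
  · rintro ⟨hmem, htake⟩
    obtain ⟨t, ht⟩ : ∃ t, l.dropWhile (· ≠ '@') = '@' :: t := by
      cases hd : l.dropWhile (· ≠ '@') with
      | nil =>
        exfalso
        have h := List.takeWhile_append_dropWhile (p := fun x => decide (x ≠ '@')) (l := l)
        rw [hd, List.append_nil] at h
        rw [← h] at hmem
        have := List.mem_takeWhile_imp hmem
        simp at this
      | cons c t =>
        have h2 := List.head?_dropWhile_not (p := fun x => decide (x ≠ '@')) (l := l)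
        rw [hd] at h2
        simp at h2
        exact ⟨t, by rw [h2]⟩
    refine ⟨t, ?_⟩
    have h := List.takeWhile_append_dropWhile (p := fun x => decide (x ≠ '@')) (l := l)
    rw [ht, htake] at h
    rw [← h]
    simp

lemma hat_not_in_locals : ∀ n ∈ noreplyLocals, '@' ∉ n := by decide

lemma patterns_eq :
    noreplyPatterns.map String.toList = noreplyLocals.map (· ++ ['@']) := by decide

-- ===== VERDICT (by name: the statement is the Claim_ definition above) =====
theorem is_noreply_email_spec : Claim_equal_is_noreply_email := by
  intro email _
  unfold Spec_is_noreply_email is_noreply_email is_noreply_email_alt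
  rw [Bool.eq_iff_iff]
  simp only [List.any_eq_true, PySem.Str.startswith_eq, PySem.Str.toList_lower,
    PySem.Chars.startswith_iff, Bool.and_eq_true, decide_eq_true_eq]
  set l := PySem.Chars.lower email.toList with hl
  constructor
  · rintro ⟨pat, hpat, hpre⟩
    have hpat' : pat.toList ∈ noreplyLocals.map (· ++ ['@']) := by
      rw [← patterns_eq]; exact List.mem_map_of_mem hpat
    obtain ⟨n, hn, hne⟩ := List.mem_map.mp hpat'
    rw [← hne] at hpre
    have h := (prefix_at_iff n l (hat_not_in_locals n hn)).mp hpre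
    exact ⟨h.1, h.2 ▸ hn⟩
  · rintro ⟨hmem, hloc⟩
    obtain ⟨pat, hpat, hpe⟩ : ∃ pat ∈ noreplyPatterns,
        pat.toList = l.takeWhile (· ≠ '@') ++ ['@'] := by
      have h : l.takeWhile (· ≠ '@') ++ ['@'] ∈ noreplyPatterns.map String.toList := by
        rw [patterns_eq]; exact List.mem_map_of_mem hloc
      obtain ⟨pat, h1, h2⟩ := List.mem_map.mp h
      exact ⟨pat, h1, h2⟩
    refine ⟨pat, hpat, ?_⟩
    rw [hpe]
    exact (prefix_at_iff _ l (hat_not_in_locals _ hloc)).mpr ⟨hmem, rfl⟩
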